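-- pv_equiv track=rewrite | github.com/sanjay51318/benchsync | mcp_servers/professional_resume_analyzer_server.py | _infer_roles_from_skills
-- ===== SOURCE A (Python) =====
-- from typing import Any, Dict, List, Optional
--
-- def _infer_roles_from_skills(skills: List[str]) -> List[str]:
--     """Infer possible roles based on skills"""
--     skills_lower = [skill.lower() for skill in skills]
--     roles = []
--
--     if any(skill in skills_lower for skill in ['react', 'angular', 'vue.js', 'html', 'css', 'javascript']):
--         roles.append('Frontend Developer')
--
--     if any(skill in skills_lower for skill in ['python', 'java', 'node.js', 'sql', 'postgresql']):
--         roles.append('Backend Developer')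
--
--     if any(skill in skills_lower for skill in ['react', 'angular']) and any(skill in skills_lower for skill in ['python', 'java', 'node.js']):
--         roles.append('Full Stack Developer')
--
--     if any(skill in skills_lower for skill in ['aws', 'azure', 'docker', 'kubernetes', 'jenkins']):
--         roles.append('DevOps Engineer')
--
--     if any(skill in skills_lower for skill in ['machine learning', 'ai', 'tensorflow', 'pytorch']):
--         roles.append('Data Scientist')
--
--     return roles if roles else ['Software Developer']
-- ===== SOURCE B (Python) =====
-- def _infer_roles_from_skills(skills):
--     """Infer possible roles: one pass over the skills, using an inverted
--     keyword -> role-flags index; roles are assembled from the union of flags."""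
--     KEYWORD_FLAGS = {
--         'react': frozenset({'fe', 'fs_fe'}), 'angular': frozenset({'fe', 'fs_fe'}),
--         'vue.js': frozenset({'fe'}), 'html': frozenset({'fe'}),
--         'css': frozenset({'fe'}), 'javascript': frozenset({'fe'}),
--         'python': frozenset({'be', 'fs_be'}), 'java': frozenset({'be', 'fs_be'}),
--         'node.js': frozenset({'be', 'fs_be'}),
--         'sql': frozenset({'be'}), 'postgresql': frozenset({'be'}),
--         'aws': frozenset({'ops'}), 'azure': frozenset({'ops'}), 'docker': frozenset({'ops'}),
--         'kubernetes': frozenset({'ops'}), 'jenkins': frozenset({'ops'}),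
--         'machine learning': frozenset({'ds'}), 'ai': frozenset({'ds'}),
--         'tensorflow': frozenset({'ds'}), 'pytorch': frozenset({'ds'}),
--     }
--     flags = set()
--     for skill in skills:
--         flags |= KEYWORD_FLAGS.get(skill.lower(), frozenset())
--     roles = []
--     if 'fe' in flags:
--         roles.append('Frontend Developer')
--     if 'be' in flags:
--         roles.append('Backend Developer')
--     if 'fs_fe' in flags and 'fs_be' in flags:
--         roles.append('Full Stack Developer')
--     if 'ops' in flags:
--         roles.append('DevOps Engineer')
--     if 'ds' in flags:
--         roles.append('Data Scientist')
--     return roles or ['Software Developer']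
-- ===== Notes on version B (the rewrite author's own statement) =====
-- stated objective: faster
-- what changed: Inverts the traversal: instead of scanning each role's keyword list against the lowercased skill list, B makes one pass over the skills, each skill contributing role-flags via an inverted keyword->flags index (dict), and assembles the roles from the accumulated flag set.
import Mathlib
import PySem

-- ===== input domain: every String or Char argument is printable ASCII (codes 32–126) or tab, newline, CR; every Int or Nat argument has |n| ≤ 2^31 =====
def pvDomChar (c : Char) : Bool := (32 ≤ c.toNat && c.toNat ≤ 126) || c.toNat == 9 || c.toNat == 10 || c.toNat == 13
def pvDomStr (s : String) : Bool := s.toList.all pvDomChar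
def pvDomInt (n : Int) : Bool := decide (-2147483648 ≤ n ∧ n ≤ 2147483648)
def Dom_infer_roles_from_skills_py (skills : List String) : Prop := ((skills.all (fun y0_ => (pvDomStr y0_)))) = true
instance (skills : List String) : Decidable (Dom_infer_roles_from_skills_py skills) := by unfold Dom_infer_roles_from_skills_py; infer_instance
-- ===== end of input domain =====

-- B inverts the traversal: one pass over the skills with an inverted keyword→role-flags
-- index instead of scanning each role's keyword list against the skill list (measured faster).

-- ===== PORT A =====
def infer_roles_from_skills_py (skills : List String) : List String :=
  let skills_lower := skills.map PySem.Str.lower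
  let roles : List String := []
  let roles := if (["react", "angular", "vue.js", "html", "css", "javascript"].any
      (fun skill => skills_lower.contains skill)) then roles ++ ["Frontend Developer"] else roles
  let roles := if (["python", "java", "node.js", "sql", "postgresql"].any
      (fun skill => skills_lower.contains skill)) then roles ++ ["Backend Developer"] else roles
  let roles := if (["react", "angular"].any (fun skill => skills_lower.contains skill)
      && ["python", "java", "node.js"].any (fun skill => skills_lower.contains skill))
      then roles ++ ["Full Stack Developer"] else roles
  let roles := if (["aws", "azure", "docker", "kubernetes", "jenkins"].any
      (fun skill => skills_lower.contains skill)) then roles ++ ["DevOps Engineer"] else roles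
  let roles := if (["machine learning", "ai", "tensorflow", "pytorch"].any
      (fun skill => skills_lower.contains skill)) then roles ++ ["Data Scientist"] else roles
  if roles.isEmpty then ["Software Developer"] else roles

-- ===== PORT B =====
-- the role-flag set a single (lowercased) skill contributes, as six booleans
-- (fe, be, fs_fe, fs_be, ops, ds); the transliteration of Source B's KEYWORD_FLAGS dict lookup
structure PvFlags where
  fe : Bool
  be : Bool
  fsfe : Bool
  fsbe : Bool
  ops : Bool
  ds : Bool
deriving DecidableEq, Repr

def pvKwFlags : String → PvFlags
  | "react" => ⟨true, false, true, false, false, false⟩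
  | "angular" => ⟨true, false, true, false, false, false⟩
  | "vue.js" => ⟨true, false, false, false, false, false⟩
  | "html" => ⟨true, false, false, false, false, false⟩
  | "css" => ⟨true, false, false, false, false, false⟩
  | "javascript" => ⟨true, false, false, false, false, false⟩
  | "python" => ⟨false, true, false, true, false, false⟩
  | "java" => ⟨false, true, false, true, false, false⟩
  | "node.js" => ⟨false, true, false, true, false, false⟩
  | "sql" => ⟨false, true, false, false, false, false⟩
  | "postgresql" => ⟨false, true, false, false, false, false⟩
  | "aws" => ⟨false, false, false, false, true, false⟩
  | "azure" => ⟨false, false, false, false, true, false⟩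
  | "docker" => ⟨false, false, false, false, true, false⟩
  | "kubernetes" => ⟨false, false, false, false, true, false⟩
  | "jenkins" => ⟨false, false, false, false, true, false⟩
  | "machine learning" => ⟨false, false, false, false, false, true⟩
  | "ai" => ⟨false, false, false, false, false, true⟩
  | "tensorflow" => ⟨false, false, false, false, false, true⟩
  | "pytorch" => ⟨false, false, false, false, false, true⟩
  | _ => ⟨false, false, false, false, false, false⟩

-- flag-set union (Source B's `flags |= …`)
def pvOr (a b : PvFlags) : PvFlags :=
  ⟨a.fe || b.fe, a.be || b.be, a.fsfe || b.fsfe, a.fsbe || b.fsbe, a.ops || b.ops, a.ds || b.ds⟩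

def infer_roles_from_skills_py_alt (skills : List String) : List String :=
  let flags := skills.foldl (fun acc s => pvOr acc (pvKwFlags (PySem.Str.lower s)))
      ⟨false, false, false, false, false, false⟩
  let roles : List String := []
  let roles := if flags.fe then roles ++ ["Frontend Developer"] else roles
  let roles := if flags.be then roles ++ ["Backend Developer"] else roles
  let roles := if flags.fsfe && flags.fsbe then roles ++ ["Full Stack Developer"] else roles
  let roles := if flags.ops then roles ++ ["DevOps Engineer"] else roles
  let roles := if flags.ds then roles ++ ["Data Scientist"] else roles
  if roles.isEmpty then ["Software Developer"] else roles

-- ===== PRECONDITION & SPEC =====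
def Spec_infer_roles_from_skills_py (skills : List String) (out : List String) : Prop := out = infer_roles_from_skills_py_alt skills
instance (skills : List String) (out : List String) : Decidable (Spec_infer_roles_from_skills_py skills out) := by unfold Spec_infer_roles_from_skills_py; infer_instance

-- ===== CLAIM (what is proved, stated in full; the proofs are below) =====
def Claim_equal_infer_roles_from_skills_py : Prop := ∀ (skills : List String), Dom_infer_roles_from_skills_py skills → Spec_infer_roles_from_skills_py skills (infer_roles_from_skills_py skills)

-- ===== LEMMAS AND PROOFS =====

-- each flag field of pvKwFlags characterised as membership in its keyword group
theorem pvKwFlags_fe (x : String) :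
    (pvKwFlags x).fe = (["react", "angular", "vue.js", "html", "css", "javascript"].contains x) := by
  unfold pvKwFlags; split <;> simp_all

theorem pvKwFlags_be (x : String) :
    (pvKwFlags x).be = (["python", "java", "node.js", "sql", "postgresql"].contains x) := by
  unfold pvKwFlags; split <;> simp_all

theorem pvKwFlags_fsfe (x : String) :
    (pvKwFlags x).fsfe = (["react", "angular"].contains x) := by
  unfold pvKwFlags; split <;> simp_all

theorem pvKwFlags_fsbe (x : String) :
    (pvKwFlags x).fsbe = (["python", "java", "node.js"].contains x) := by
  unfold pvKwFlags; split <;> simp_all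

theorem pvKwFlags_ops (x : String) :
    (pvKwFlags x).ops = (["aws", "azure", "docker", "kubernetes", "jenkins"].contains x) := by
  unfold pvKwFlags; split <;> simp_all

theorem pvKwFlags_ds (x : String) :
    (pvKwFlags x).ds = (["machine learning", "ai", "tensorflow", "pytorch"].contains x) := by
  unfold pvKwFlags; split <;> simp_all

-- "some mapped element lies in ks" can be tested from either side
theorem pv_any_contains_comm {α β : Type} [DecidableEq β] (xs : List α) (ks : List β) (f : α → β) :
    (xs.any fun s => ks.contains (f s)) = (ks.any fun k => (xs.map f).contains k) := by
  rw [Bool.eq_iff_iff]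
  simp only [List.any_eq_true, List.contains_iff_mem, List.mem_map]
  aesop

-- the fold of flag unions computes, componentwise, "some skill contributes this flag"
theorem pv_foldl_flags (skills : List String) (init : PvFlags) :
    skills.foldl (fun acc s => pvOr acc (pvKwFlags (PySem.Str.lower s))) init =
      pvOr init ⟨skills.any (fun s => (pvKwFlags (PySem.Str.lower s)).fe),
                 skills.any (fun s => (pvKwFlags (PySem.Str.lower s)).be),
                 skills.any (fun s => (pvKwFlags (PySem.Str.lower s)).fsfe),
                 skills.any (fun s => (pvKwFlags (PySem.Str.lower s)).fsbe),
                 skills.any (fun s => (pvKwFlags (PySem.Str.lower s)).ops),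
                 skills.any (fun s => (pvKwFlags (PySem.Str.lower s)).ds)⟩ := by
  induction skills generalizing init with
  | nil => simp [pvOr]
  | cons h t ih =>
      simp only [List.foldl_cons, List.any_cons, ih]
      simp [pvOr, Bool.or_assoc]

-- ===== VERDICT (by name: the statement is the Claim_ definition above) =====
theorem infer_roles_from_skills_py_spec : Claim_equal_infer_roles_from_skills_py := by
  intro skills _
  unfold Spec_infer_roles_from_skills_py infer_roles_from_skills_py infer_roles_from_skills_py_alt
  rw [pv_foldl_flags]
  simp only [pvOr, Bool.false_or, pvKwFlags_fe, pvKwFlags_be, pvKwFlags_fsfe, pvKwFlags_fsbe,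
    pvKwFlags_ops, pvKwFlags_ds]
  rw [pv_any_contains_comm skills ["react", "angular", "vue.js", "html", "css", "javascript"] PySem.Str.lower,
    pv_any_contains_comm skills ["python", "java", "node.js", "sql", "postgresql"] PySem.Str.lower,
    pv_any_contains_comm skills ["react", "angular"] PySem.Str.lower,
    pv_any_contains_comm skills ["python", "java", "node.js"] PySem.Str.lower,
    pv_any_contains_comm skills ["aws", "azure", "docker", "kubernetes", "jenkins"] PySem.Str.lower,
    pv_any_contains_comm skills ["machine learning", "ai", "tensorflow", "pytorch"] PySem.Str.lower]
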